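-- pv_equiv track=rewrite | github.com/BlenderCN/Learnbgame | All_In_One/addons/shapekeyimport.py | getDependentPathIdsSets
-- ===== SOURCE A (Python) =====
-- def getDependentPathIdsSets(shapeKeyMap):
--     pathIdSets = []
--     allAddedPathIds = set()
--     for targetId in shapeKeyMap.keys():
--         #Keep track of the added path Ids since the target can be a shapeKey,
--         #or a target of one of the shapeKeys of this target (many->many relation)
--         if(targetId not in allAddedPathIds):
--             pathIdSet = set()
--             addDependentPathsToList(shapeKeyMap, pathIdSet, targetId)
--             pathIdSets.append(pathIdSet)
--             allAddedPathIds = allAddedPathIds.union(pathIdSet)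
--     return pathIdSets
--
-- def getKeysetWithValue(srcMap, value):
--     keySet = set()
--     for key in srcMap:
--         if(value in srcMap[key]):
--           keySet.add(key)
--     return keySet
--
-- def addDependentPathsToList(shapeKeyMap, pathIdSet, targetId):
--     if(targetId in pathIdSet):
--         return pathIdSet
--
--     pathIdSet.add(targetId)
--     shapeKeyElemIdMap = shapeKeyMap.get(targetId)
--
--     if(shapeKeyElemIdMap == None):
--         return pathIdSet
--
--     shapeKeyElemIdList = shapeKeyElemIdMap.keys()
--     if(shapeKeyElemIdList == None):
--         return pathIdSet
--
--     for shapeKeyElemId in shapeKeyElemIdList: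
--         #Recuresively add the Ids that are shape key of this shape key
--         addDependentPathsToList(shapeKeyMap, pathIdSet, shapeKeyElemId)
--
--         #Recursively add the Ids that are other targets of this shape key
--         keyset = getKeysetWithValue(shapeKeyMap, shapeKeyElemId)
--         for key in keyset:
--             addDependentPathsToList(shapeKeyMap, pathIdSet, key)
--
--     return pathIdSet
-- ===== SOURCE B (Python) =====
-- def getDependentPathIdsSets(shapeKeyMap):
--     # Reverse index: elem id -> list of target ids whose shape-key dict contains it,
--     # built once (A rescans the whole map for every elem via getKeysetWithValue).
--     rev = {}
--     for targetId, elemMap in shapeKeyMap.items():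
--         for elemId in elemMap:
--             rev.setdefault(elemId, []).append(targetId)
--     pathIdSets = []
--     allSeen = set()
--     for root in shapeKeyMap:
--         if root not in allSeen:
--             # iterative DFS with an explicit stack instead of A's recursion
--             comp = set()
--             stack = [root]
--             while stack:
--                 node = stack.pop()
--                 if node in comp:
--                     continue
--                 comp.add(node)
--                 elemMap = shapeKeyMap.get(node)
--                 if elemMap is not None:
--                     children = [c for e in elemMap for c in [e] + rev.get(e, [])]
--                     stack.extend(reversed(children))
--             pathIdSets.append(comp)
--             allSeen |= comp
--     return pathIdSets
-- ===== Notes on version B (the rewrite author's own statement) =====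
-- stated objective: faster
-- what changed: A computes each component by a recursive closure that rescans the entire map (getKeysetWithValue) for every element it touches; B builds a reverse index elem->targets once and runs an iterative explicit-stack DFS over it, removing every repeated whole-map scan.
import Mathlib
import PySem

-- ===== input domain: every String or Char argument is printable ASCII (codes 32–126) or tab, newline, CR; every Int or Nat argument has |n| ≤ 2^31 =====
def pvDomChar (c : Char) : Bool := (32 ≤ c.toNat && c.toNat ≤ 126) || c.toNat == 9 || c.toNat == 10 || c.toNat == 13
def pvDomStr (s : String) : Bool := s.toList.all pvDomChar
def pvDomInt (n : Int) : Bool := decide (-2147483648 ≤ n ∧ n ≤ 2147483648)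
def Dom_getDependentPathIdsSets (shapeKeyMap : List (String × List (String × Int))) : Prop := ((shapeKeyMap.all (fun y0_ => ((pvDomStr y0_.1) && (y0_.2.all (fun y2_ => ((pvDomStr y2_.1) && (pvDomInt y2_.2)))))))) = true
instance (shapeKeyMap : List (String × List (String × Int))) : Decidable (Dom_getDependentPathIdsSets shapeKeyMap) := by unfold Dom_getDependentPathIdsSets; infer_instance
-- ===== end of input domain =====

-- B replaces A's recursive closure with repeated whole-map scans by a reverse index built
-- once plus an explicit-stack DFS (objective: faster — no per-element rescans of the map).

-- ===== PORT A =====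
-- shapeKeyMap.get(targetId) (dict lookup; keys are unique under Pre_, first match)
def pvGetA (m : List (String × List (String × Int))) (k : String) : Option (List (String × Int)) :=
  (m.find? (fun kv => kv.1 == k)).map (·.2)

-- all node names occurring in the map (keys and inner keys); used only to size the fuel
def pvUniv (m : List (String × List (String × Int))) : List String :=
  m.flatMap (fun kv => kv.1 :: kv.2.map (·.1))

-- getKeysetWithValue: for key in srcMap: if value in srcMap[key]: keySet.add(key)
def getKeysetWithValue (m : List (String × List (String × Int))) (value : String) : PySem.Set String :=
  m.foldl (fun ks kv => if (kv.2.map (·.1)).contains value then PySem.Set.add ks kv.1 else ks)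
    PySem.Set.empty

-- addDependentPathsToList; the fuel only makes the recursion total (it never runs out:
-- each nested call is made with one more element in pathIdSet, see the proofs below).
def addDependentPathsToList (m : List (String × List (String × Int))) :
    Nat → PySem.Set String → String → PySem.Set String
  | 0, pathIdSet, _ => pathIdSet
  | fuel + 1, pathIdSet, targetId =>
    if PySem.Set.contains pathIdSet targetId then pathIdSet
    else
      let pathIdSet1 := PySem.Set.add pathIdSet targetId
      match pvGetA m targetId with
      | none => pathIdSet1          -- shapeKeyElemIdMap == None
      | some shapeKeyElemIdMap =>
        -- (the Python's 'if shapeKeyElemIdList == None' branch is dead: keys() is never None)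
        (shapeKeyElemIdMap.map (·.1)).foldl
          (fun s shapeKeyElemId =>
            let s1 := addDependentPathsToList m fuel s shapeKeyElemId
            (getKeysetWithValue m shapeKeyElemId).foldl
              (fun s2 key => addDependentPathsToList m fuel s2 key) s1)
          pathIdSet1

def getDependentPathIdsSets (shapeKeyMap : List (String × List (String × Int))) : List (List String) :=
  ((shapeKeyMap.map (·.1)).foldl
    (fun (acc : List (List String) × PySem.Set String) targetId =>
      if PySem.Set.contains acc.2 targetId then acc
      else
        let pathIdSet := addDependentPathsToList shapeKeyMap ((pvUniv shapeKeyMap).length + 1)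
          PySem.Set.empty targetId
        (acc.1 ++ [pathIdSet], PySem.Set.union acc.2 pathIdSet))
    ([], PySem.Set.empty)).1

-- ===== PORT B =====
-- rev: elemId -> list of targetIds whose inner dict contains it (built once)
def pvRevB (m : List (String × List (String × Int))) : PySem.Dict String (List String) :=
  m.foldl (fun d kv => kv.2.foldl (fun d2 ev => d2.modify ev.1 [] (· ++ [kv.1])) d)
    PySem.Dict.empty

-- the while-stack loop; the Lean list head is the Python stack's top (pop() +
-- extend(reversed(children)) visits the children front to back).  The fuel only
-- totalizes the while loop (never exhausted: see the proofs below).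
def pvDfsStackB (m : List (String × List (String × Int))) (rev : PySem.Dict String (List String)) :
    Nat → PySem.Set String → List String → PySem.Set String
  | 0, comp, _ => comp
  | _ + 1, comp, [] => comp
  | fuel + 1, comp, node :: rest =>
    if PySem.Set.contains comp node then pvDfsStackB m rev fuel comp rest
    else
      let comp1 := PySem.Set.add comp node
      match pvGetA m node with
      | none => pvDfsStackB m rev fuel comp1 rest
      | some elemMap =>
        let children := (elemMap.map (·.1)).flatMap (fun e => e :: rev.getD e [])
        pvDfsStackB m rev fuel comp1 (children ++ rest)

def pvFuelB (m : List (String × List (String × Int))) : Nat :=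
  (pvUniv m).length * ((pvUniv m).length * ((pvUniv m).length + 1) + 1) + 1

def getDependentPathIdsSets_alt (shapeKeyMap : List (String × List (String × Int))) : List (List String) :=
  let rev := pvRevB shapeKeyMap
  ((shapeKeyMap.map (·.1)).foldl
    (fun (acc : List (List String) × PySem.Set String) root =>
      if PySem.Set.contains acc.2 root then acc
      else
        let comp := pvDfsStackB shapeKeyMap rev (pvFuelB shapeKeyMap) PySem.Set.empty [root]
        (acc.1 ++ [comp], PySem.Set.union acc.2 comp))
    ([], PySem.Set.empty)).1

-- ===== PRECONDITION & SPEC =====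
-- Pre_ only says the association list really encodes a Python dict of dicts: outer keys
-- and each inner dict's keys are distinct (a Python dict cannot hold duplicate keys, so
-- no input of A is excluded).
def Pre_getDependentPathIdsSets (shapeKeyMap : List (String × List (String × Int))) : Prop :=
  (shapeKeyMap.map (·.1)).Nodup ∧ ∀ kv ∈ shapeKeyMap, (kv.2.map (·.1)).Nodup
instance (shapeKeyMap : List (String × List (String × Int))) : Decidable (Pre_getDependentPathIdsSets shapeKeyMap) := by
  unfold Pre_getDependentPathIdsSets; infer_instance

def pvWitness_getDependentPathIdsSets : (List (String × List (String × Int))) :=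
  [("a", [("b", 1), ("c", 2)]), ("b", []), ("d", [("d", 0)])]

def Spec_getDependentPathIdsSets (shapeKeyMap : List (String × List (String × Int))) (out : List (List String)) : Prop := out = getDependentPathIdsSets_alt shapeKeyMap
instance (shapeKeyMap : List (String × List (String × Int))) (out : List (List String)) : Decidable (Spec_getDependentPathIdsSets shapeKeyMap out) := by unfold Spec_getDependentPathIdsSets; infer_instance

-- ===== CLAIM (what is proved, stated in full; the proofs are below) =====
def Claim_equal_getDependentPathIdsSets : Prop := ∀ (shapeKeyMap : List (String × List (String × Int))), Dom_getDependentPathIdsSets shapeKeyMap → Pre_getDependentPathIdsSets shapeKeyMap → Spec_getDependentPathIdsSets shapeKeyMap (getDependentPathIdsSets shapeKeyMap)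

-- ===== LEMMAS AND PROOFS =====

-- the list of target keys whose inner dict contains e, in map order (reference form)
def pvKeysWith (m : List (String × List (String × Int))) (e : String) : List String :=
  (m.filter (fun kv => (kv.2.map (·.1)).contains e)).map (·.1)

-- reference children function of the dependency graph
def pvChildren (m : List (String × List (String × Int))) (t : String) : List String :=
  match pvGetA m t with
  | none => []
  | some em => (em.map (·.1)).flatMap (fun e => e :: pvKeysWith m e)

-- number of universe names not yet visited
def pvCard (m : List (String × List (String × Int))) (S : List String) : Nat :=
  ((pvUniv m).filter (fun x => decide (x ∉ S))).length

lemma pvCard_mono (m : List (String × List (String × Int))) {S S' : List String}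
    (h : ∀ x ∈ S, x ∈ S') : pvCard m S' ≤ pvCard m S := by
  unfold pvCard
  rw [← List.countP_eq_length_filter, ← List.countP_eq_length_filter]
  apply List.countP_mono_left
  intro x _ hx
  simp only [decide_eq_true_eq] at *
  exact fun hxS => hx (h x hxS)

lemma pvCard_add_lt (m : List (String × List (String × Int))) {S : List String} {t : String}
    (ht : t ∈ pvUniv m) (hts : t ∉ S) : pvCard m (PySem.Set.add S t) < pvCard m S := by
  unfold pvCard
  rw [PySem.Set.add_of_not_mem hts]
  have h1 : ∀ x : String, (decide (x ∉ S ++ [t])) = (decide (x ≠ t) && decide (x ∉ S)) := by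
    intro x
    by_cases h : x ∈ S <;> by_cases h2 : x = t <;> simp [List.mem_append, h, h2]
  simp only [h1, ← List.filter_filter]
  apply List.length_filter_lt_length_iff_exists.mpr
  refine ⟨t, List.mem_filter.mpr ⟨ht, by simpa using hts⟩, by simp⟩

lemma pvCard_add_not_univ (m : List (String × List (String × Int))) {S : List String} {t : String}
    (ht : t ∉ pvUniv m) : pvCard m (PySem.Set.add S t) = pvCard m S := by
  unfold pvCard
  congr 1
  apply List.filter_congr
  intro x hx
  have hxt : x ≠ t := fun h => ht (h ▸ hx)
  simp [PySem.Set.mem_add, hxt]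

-- reference DFS (no fuel; well-founded on (unvisited universe names, stack length))
def pvDfs (m : List (String × List (String × Int))) (S : List String) (stack : List String) :
    List String :=
  match stack with
  | [] => S
  | t :: rest =>
    if t ∈ S then pvDfs m S rest
    else if _ht : t ∈ pvUniv m then pvDfs m (PySem.Set.add S t) (pvChildren m t ++ rest)
    else pvDfs m (PySem.Set.add S t) rest
termination_by (pvCard m S, stack.length)
decreasing_by
  · exact Prod.Lex.right _ (by simp)
  · exact Prod.Lex.left _ _ (pvCard_add_lt m _ht (by assumption))
  · rw [pvCard_add_not_univ m _ht]; exact Prod.Lex.right _ (by simp)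

lemma pvDfs_subset (m : List (String × List (String × Int))) (S stack : List String) :
    ∀ x ∈ S, x ∈ pvDfs m S stack := by
  induction S, stack using pvDfs.induct m with
  | case1 S => simp [pvDfs]
  | case2 S t rest hmem ih =>
    intro x hx
    rw [pvDfs, if_pos hmem]
    exact ih x hx
  | case3 S t rest hmem ht ih =>
    intro x hx
    rw [pvDfs, if_neg hmem, dif_pos ht]
    exact ih x (by simp [PySem.Set.mem_add, hx])
  | case4 S t rest hmem ht ih =>
    intro x hx
    rw [pvDfs, if_neg hmem, dif_neg ht]
    exact ih x (by simp [PySem.Set.mem_add, hx])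

lemma pvDfs_append (m : List (String × List (String × Int))) (S l1 l2 : List String) :
    pvDfs m S (l1 ++ l2) = pvDfs m (pvDfs m S l1) l2 := by
  induction S, l1 using pvDfs.induct m with
  | case1 S => rw [pvDfs]; simp
  | case2 S t rest hmem ih =>
    rw [List.cons_append, pvDfs, if_pos hmem, pvDfs, if_pos hmem]
    exact ih
  | case3 S t rest hmem ht ih =>
    rw [List.cons_append, pvDfs, if_neg hmem, dif_pos ht]
    conv_rhs => rw [pvDfs, if_neg hmem, dif_pos ht]
    rw [← List.append_assoc]
    exact ih
  | case4 S t rest hmem ht ih =>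
    rw [List.cons_append, pvDfs, if_neg hmem, dif_neg ht]
    conv_rhs => rw [pvDfs, if_neg hmem, dif_neg ht]
    exact ih

lemma pvChildren_subset_univ (m : List (String × List (String × Int))) (t : String) :
    ∀ x ∈ pvChildren m t, x ∈ pvUniv m := by
  intro x hx
  unfold pvChildren at hx
  cases hg : pvGetA m t with
  | none => rw [hg] at hx; simp at hx
  | some em =>
    rw [hg] at hx
    have hkv : ∃ kv ∈ m, kv.2 = em := by
      unfold pvGetA at hg
      cases hf : m.find? (fun kv => kv.1 == t) with
      | none => rw [hf] at hg; simp at hg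
      | some kv =>
        rw [hf] at hg
        exact ⟨kv, List.mem_of_find?_eq_some hf, by simpa using hg⟩
    obtain ⟨kv, hkvm, hkv2⟩ := hkv
    simp only [List.mem_flatMap, List.mem_map] at hx
    obtain ⟨e, ⟨ev, hev, hev1⟩, hxe⟩ := hx
    rcases List.mem_cons.mp hxe with rfl | hxk
    · exact List.mem_flatMap.mpr ⟨kv, hkvm, by
        subst hkv2
        exact List.mem_cons.mpr (Or.inr (List.mem_map.mpr ⟨ev, hev, hev1⟩))⟩
    · unfold pvKeysWith at hxk
      simp only [List.mem_map, List.mem_filter] at hxk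
      obtain ⟨kv', ⟨hkv'm, _⟩, hkv'1⟩ := hxk
      exact List.mem_flatMap.mpr ⟨kv', hkv'm, by simp [hkv'1]⟩

lemma pvKeys_subset_univ (m : List (String × List (String × Int))) :
    ∀ x ∈ m.map (·.1), x ∈ pvUniv m := by
  intro x hx
  obtain ⟨kv, hkv, h1⟩ := List.mem_map.mp hx
  exact List.mem_flatMap.mpr ⟨kv, hkv, by simp [h1]⟩

-- getKeysetWithValue agrees with the reference filtered key list (outer keys distinct)
lemma pvKsv_eq (m : List (String × List (String × Int)))
    (hnd : (m.map (·.1)).Nodup) (e : String) :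
    getKeysetWithValue m e = pvKeysWith m e := by
  have aux : ∀ (l : List (String × List (String × Int))) (acc : List String),
      (l.map (·.1)).Nodup → (∀ kv ∈ l, kv.1 ∉ acc) →
      l.foldl (fun ks kv => if (kv.2.map (·.1)).contains e then PySem.Set.add ks kv.1 else ks) acc
        = acc ++ pvKeysWith l e := by
    intro l
    induction l with
    | nil => intro acc _ _; simp [pvKeysWith]
    | cons kv l' ih =>
      intro acc hnd hacc
      simp only [List.map_cons, List.nodup_cons] at hnd
      rw [List.foldl_cons]
      by_cases hc : (kv.2.map (·.1)).contains e
      · have hc' : e ∈ kv.2.map (·.1) := by simpa using hc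
        rw [if_pos hc, PySem.Set.add_of_not_mem (hacc kv (by simp))]
        rw [ih (acc ++ [kv.1]) hnd.2 ?fresh]
        case fresh =>
          intro kv' hkv'
          simp only [List.mem_append, List.mem_singleton]
          rintro (h | h)
          · exact hacc kv' (by simp [hkv']) h
          · exact hnd.1 (h ▸ List.mem_map.mpr ⟨kv', hkv', rfl⟩)
        simp [pvKeysWith, hc']
      · have hc' : e ∉ kv.2.map (·.1) := by simpa using hc
        rw [if_neg hc, ih acc hnd.2 (fun kv' hkv' => hacc kv' (by simp [hkv']))]
        simp [pvKeysWith, hc']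
  simpa [getKeysetWithValue, PySem.Set.empty] using aux m [] hnd (by simp)

lemma pvRev_aux (k e : String) (l : List (String × Int)) (hnd : (l.map (·.1)).Nodup) :
    ((l.map (fun ev => (ev.1, k))).filter (fun p => p.1 == e)).map (·.2)
      = if e ∈ l.map (·.1) then [k] else [] := by
  induction l with
  | nil => simp
  | cons ev l2 ih2 =>
    simp only [List.map_cons, List.nodup_cons] at hnd
    by_cases hev : ev.1 = e
    · subst hev
      have hrest : ((l2.map (fun ev => (ev.1, k))).filter (fun p => p.1 == ev.1)) = [] := by
        rw [List.filter_eq_nil_iff]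
        intro p hp
        obtain ⟨ev', hev', rfl⟩ := List.mem_map.mp hp
        simp only [beq_iff_eq]
        intro h
        exact hnd.1 (h ▸ List.mem_map.mpr ⟨ev', hev', rfl⟩)
      simp [hrest]
    · have hih := ih2 hnd.2
      have hne : ¬ e = ev.1 := fun h => hev h.symm
      simp only [List.map_cons, List.filter_cons]
      rw [if_neg (by simpa using hev), hih]
      by_cases hc : e ∈ l2.map (·.1) <;> simp [hc, hne]

-- B's reverse index agrees with the reference filtered key list (inner keys distinct)
lemma pvRev_eq (m : List (String × List (String × Int)))
    (hin : ∀ kv ∈ m, (kv.2.map (·.1)).Nodup) (e : String) :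
    (pvRevB m).getD e [] = pvKeysWith m e := by
  have hflat : pvRevB m
      = (m.flatMap (fun kv => kv.2.map (fun ev => (ev.1, kv.1)))).foldl
          (fun d p => d.modify p.1 [] (· ++ [p.2])) PySem.Dict.empty := by
    unfold pvRevB
    rw [List.foldl_flatMap]
    congr 1
    funext d kv
    rw [List.foldl_map]
  rw [hflat, PySem.Dict.getD_foldl_modify_append, PySem.Dict.getD_empty, List.nil_append]
  clear hflat
  induction m with
  | nil => simp [pvKeysWith]
  | cons kv l' ih =>
    have hin' : ∀ kv' ∈ l', (kv'.2.map (·.1)).Nodup := fun kv' h => hin kv' (by simp [h])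
    have hhead : (kv.2.map (·.1)).Nodup := hin kv (by simp)
    rw [List.flatMap_cons, List.filter_append, List.map_append, ih hin']
    have hh := pvRev_aux kv.1 e kv.2 hhead
    rw [hh]
    by_cases hc : e ∈ kv.2.map (·.1)
    · simp [pvKeysWith, hc]
    · simp [pvKeysWith, hc]

-- A's recursive closure computes the reference DFS
lemma pvA_eq_dfs (m : List (String × List (String × Int)))
    (hnd : (m.map (·.1)).Nodup) :
    ∀ n f S cs, pvCard m S ≤ n → n < f → (∀ c ∈ cs, c ∈ pvUniv m) →
      cs.foldl (fun s c => addDependentPathsToList m f s c) S = pvDfs m S cs := by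
  intro n
  induction n using Nat.strong_induction_on with
  | _ n IHn =>
    intro f S cs
    induction cs generalizing S with
    | nil => intro _ _ _; rw [pvDfs]; rfl
    | cons c cs' IHcs =>
      intro hcard hnf hcs
      obtain ⟨f', rfl⟩ : ∃ f', f = f' + 1 := ⟨f - 1, by omega⟩
      rw [List.foldl_cons]
      by_cases hc : c ∈ S
      · have hstep : addDependentPathsToList m (f' + 1) S c = S := by
          rw [addDependentPathsToList, if_pos ((PySem.Set.contains_iff S c).mpr hc)]
        rw [hstep, pvDfs, if_pos hc]
        exact IHcs S hcard hnf (fun x hx => hcs x (by simp [hx]))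
      · have hcu : c ∈ pvUniv m := hcs c (by simp)
        have hcardlt := pvCard_add_lt m hcu hc
        have hpos : 1 ≤ n := by omega
        have hsub : addDependentPathsToList m (f' + 1) S c
            = pvDfs m (PySem.Set.add S c) (pvChildren m c) := by
          rw [addDependentPathsToList,
            if_neg (by rw [PySem.Set.contains_iff]; exact hc)]
          cases hg : pvGetA m c with
          | none => simp only [pvChildren, hg]; rw [pvDfs]
          | some em =>
            simp only [pvChildren, hg]
            have hflat : ∀ (init : PySem.Set String),
                (em.map (·.1)).foldl
                  (fun s e =>
                    (getKeysetWithValue m e).foldl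
                      (fun s2 key => addDependentPathsToList m f' s2 key)
                      (addDependentPathsToList m f' s e)) init
                = ((em.map (·.1)).flatMap (fun e => e :: getKeysetWithValue m e)).foldl
                    (fun s c => addDependentPathsToList m f' s c) init := by
              intro init
              rw [List.foldl_flatMap]
              rfl
            rw [hflat]
            have hksv : ((em.map (·.1)).flatMap (fun e => e :: getKeysetWithValue m e))
                = ((em.map (·.1)).flatMap (fun e => e :: pvKeysWith m e)) := by
              simp only [pvKsv_eq m hnd]
            rw [hksv]
            rw [IHn (n - 1) (by omega) f' (PySem.Set.add S c)
              ((em.map (·.1)).flatMap (fun e => e :: pvKeysWith m e))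
              (by omega) (by omega)
              (fun x hx => pvChildren_subset_univ m c x (by simp only [pvChildren, hg]; exact hx))]
        rw [hsub, pvDfs, if_neg hc, dif_pos hcu, pvDfs_append]
        apply IHcs
        · exact le_trans (pvCard_mono m (pvDfs_subset m _ _)) (by omega)
        · omega
        · exact fun x hx => hcs x (by simp [hx])

lemma pvMem_len (m : List (String × List (String × Int))) {kv : String × List (String × Int)}
    (h : kv ∈ m) : kv.2.length + 1 ≤ (pvUniv m).length := by
  induction m with
  | nil => simp at h
  | cons kv' m' ih =>
    unfold pvUniv
    rw [List.flatMap_cons, List.length_append]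
    rcases List.mem_cons.mp h with rfl | h'
    · simp
    · have := ih h'
      unfold pvUniv at this
      omega

lemma pvM_len (m : List (String × List (String × Int))) : m.length ≤ (pvUniv m).length := by
  induction m with
  | nil => simp
  | cons kv m' ih =>
    unfold pvUniv
    rw [List.flatMap_cons, List.length_append]
    unfold pvUniv at ih
    simp only [List.length_cons]
    omega

lemma pvChildren_len (m : List (String × List (String × Int))) (t : String) :
    (pvChildren m t).length ≤ (pvUniv m).length * ((pvUniv m).length + 1) := by
  unfold pvChildren
  cases hg : pvGetA m t with
  | none => simp
  | some em =>
    have hem : em.length ≤ (pvUniv m).length := by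
      unfold pvGetA at hg
      cases hf : m.find? (fun kv => kv.1 == t) with
      | none => rw [hf] at hg; simp at hg
      | some kv =>
        rw [hf] at hg
        simp only [Option.map_some, Option.some.injEq] at hg
        have := pvMem_len m (List.mem_of_find?_eq_some hf)
        rw [← hg]
        omega
    rw [List.length_flatMap]
    have hbound : ∀ x ∈ (em.map (·.1)).map (fun e => (e :: pvKeysWith m e).length),
        x ≤ (pvUniv m).length + 1 := by
      intro x hx
      obtain ⟨e, _, rfl⟩ := List.mem_map.mp hx
      have h1 : (pvKeysWith m e).length ≤ m.length := by
        unfold pvKeysWith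
        rw [List.length_map]
        exact List.length_filter_le _ _
      have := pvM_len m
      simp only [List.length_cons]
      omega
    calc ((em.map (·.1)).map (fun e => (e :: pvKeysWith m e).length)).sum
        ≤ ((em.map (·.1)).map (fun e => (e :: pvKeysWith m e).length)).length
            • ((pvUniv m).length + 1) := List.sum_le_card_nsmul _ _ hbound
      _ = (em.map (·.1)).length * ((pvUniv m).length + 1) := by rw [List.length_map, smul_eq_mul]
      _ ≤ (pvUniv m).length * ((pvUniv m).length + 1) := by
          rw [List.length_map]; exact Nat.mul_le_mul_right _ hem

-- B's stack loop computes the reference DFS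
lemma pvB_eq_dfs (m : List (String × List (String × Int)))
    (hin : ∀ kv ∈ m, (kv.2.map (·.1)).Nodup) :
    ∀ f S stack, (∀ x ∈ stack, x ∈ pvUniv m) →
      pvCard m S * ((pvUniv m).length * ((pvUniv m).length + 1) + 1) + stack.length ≤ f →
      pvDfsStackB m (pvRevB m) f S stack = pvDfs m S stack := by
  intro f
  induction f with
  | zero =>
    intro S stack _ hb
    have hs : stack = [] := List.eq_nil_of_length_eq_zero (by omega)
    subst hs
    rw [pvDfs]; rfl
  | succ f IH =>
    intro S stack hsub hb
    cases stack with
    | nil => rw [pvDfs]; rfl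
    | cons node rest =>
      rw [pvDfsStackB]
      by_cases hmem : node ∈ S
      · rw [if_pos ((PySem.Set.contains_iff _ _).mpr hmem), pvDfs, if_pos hmem]
        apply IH S rest (fun x hx => hsub x (by simp [hx]))
        simp only [List.length_cons] at hb
        generalize pvCard m S * ((pvUniv m).length * ((pvUniv m).length + 1) + 1) = A at hb ⊢
        omega
      · have hnu : node ∈ pvUniv m := hsub node (by simp)
        have hlt := pvCard_add_lt m hnu hmem
        rw [if_neg (by rw [PySem.Set.contains_iff]; exact hmem), pvDfs, if_neg hmem, dif_pos hnu]
        obtain ⟨d, hd⟩ : ∃ d, pvCard m S = pvCard m (PySem.Set.add S node) + 1 + d :=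
          ⟨pvCard m S - pvCard m (PySem.Set.add S node) - 1, by omega⟩
        cases hg : pvGetA m node with
        | none =>
          have hch : pvChildren m node = [] := by simp only [pvChildren, hg]
          rw [hch, List.nil_append]
          apply IH _ rest (fun x hx => hsub x (by simp [hx]))
          simp only [List.length_cons] at hb
          rw [hd] at hb
          generalize hA : pvCard m (PySem.Set.add S node)
              * ((pvUniv m).length * ((pvUniv m).length + 1) + 1) = A at hb ⊢
          generalize hB : d * ((pvUniv m).length * ((pvUniv m).length + 1) + 1) = B at hb
          rw [Nat.add_mul, Nat.add_mul, hA, hB] at hb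
          omega
        | some em =>
          have hch : (em.map (·.1)).flatMap (fun e => e :: (pvRevB m).getD e [])
              = pvChildren m node := by
            simp only [pvChildren, hg, pvRev_eq m hin]
          simp only [hch]
          apply IH _ (pvChildren m node ++ rest)
          · intro x hx
            rcases List.mem_append.mp hx with h | h
            · exact pvChildren_subset_univ m node x h
            · exact hsub x (by simp [h])
          · have hcl := pvChildren_len m node
            simp only [List.length_cons] at hb
            rw [hd] at hb
            rw [List.length_append]
            generalize hA : pvCard m (PySem.Set.add S node)
                * ((pvUniv m).length * ((pvUniv m).length + 1) + 1) = A at hb ⊢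
            generalize hB : d * ((pvUniv m).length * ((pvUniv m).length + 1) + 1) = B at hb
            generalize hC : (pvUniv m).length * ((pvUniv m).length + 1) = C at hb hcl hA hB ⊢
            rw [Nat.add_mul, Nat.add_mul, hA, hB] at hb
            omega

-- ===== VERDICT (by name: the statement is the Claim_ definition above) =====
theorem getDependentPathIdsSets_spec : Claim_equal_getDependentPathIdsSets := by
  intro m _ hpre
  obtain ⟨hnd, hin⟩ := hpre
  have hcard0 : pvCard m PySem.Set.empty = (pvUniv m).length := by
    simp [pvCard, PySem.Set.empty]
  unfold Spec_getDependentPathIdsSets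
  simp only [getDependentPathIdsSets, getDependentPathIdsSets_alt]
  refine congrArg Prod.fst ?_
  apply PySem.List.foldl_congr_mem
  intro acc t ht
  by_cases hc : PySem.Set.contains acc.2 t
  · rw [if_pos hc, if_pos hc]
  · rw [if_neg hc, if_neg hc]
    have htu : t ∈ pvUniv m := pvKeys_subset_univ m t ht
    have hA : addDependentPathsToList m ((pvUniv m).length + 1) PySem.Set.empty t
        = pvDfs m PySem.Set.empty [t] := by
      have h := pvA_eq_dfs m hnd ((pvUniv m).length) ((pvUniv m).length + 1) PySem.Set.empty [t]
        (by rw [hcard0]) (by omega) (by intro c hcm; rw [List.mem_singleton] at hcm; subst hcm; exact htu)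
      simpa using h
    have hB : pvDfsStackB m (pvRevB m) (pvFuelB m) PySem.Set.empty [t]
        = pvDfs m PySem.Set.empty [t] := by
      apply pvB_eq_dfs m hin
      · intro x hx; rw [List.mem_singleton] at hx; subst hx; exact htu
      · rw [hcard0]; unfold pvFuelB; simp
    rw [hA, hB]
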